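-- pv_equiv track=rewrite | github.com/Chariton-kyp/EllinAI-Greek-Privacy-Filter | scripts/relabel_afm_spans.py | shape_of
-- ===== SOURCE A (Python) =====
-- def shape_of(span: str) -> str:
--     """Return a coarse shape string for an AFM span, used to bucket
--     the relabel-source distribution in the report.
--     """
--     out: list[str] = []
--     i = 0
--     while i < len(span):
--         ch = span[i]
--         if ch.isdigit():
--             j = i
--             while j < len(span) and span[j].isdigit():
--                 j += 1
--             out.append(f"d{j - i}")
--             i = j
--         elif ch.isalpha():
--             j = i
--             cls = "A" if ch.isupper() else "a"
--             while j < len(span) and span[j].isalpha() and (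
--                 ("A" if span[j].isupper() else "a") == cls
--             ):
--                 j += 1
--             out.append(f"{cls}{j - i}")
--             i = j
--         elif ch == " ":
--             out.append(" ")
--             i += 1
--         else:
--             out.append(ch)
--             i += 1
--     return "".join(out)
-- ===== SOURCE B (Python) =====
-- def shape_of(span: str) -> str:
--     def key(ch):
--         if ch.isdigit():
--             return "d"
--         if ch.isalpha():
--             return "A" if ch.isupper() else "a"
--         return ch
--
--     pieces = []
--     cur = None
--     count = 0
--     for ch in span:
--         k = key(ch)
--         if cur is not None and k == cur and k in ("d", "A", "a"):
--             count += 1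
--         else:
--             if cur is not None:
--                 pieces.append(f"{cur}{count}" if cur in ("d", "A", "a") else cur)
--             cur, count = k, 1
--     if cur is not None:
--         pieces.append(f"{cur}{count}" if cur in ("d", "A", "a") else cur)
--     return "".join(pieces)
-- ===== Notes on version B (the rewrite author's own statement) =====
-- stated objective: simpler
-- what changed: Replaced A's index-driven outer while with nested inner run-scanning while loops by a single streaming fold over the characters: each char is mapped to a class key ('d', 'A', 'a', or the literal char) and one current-run accumulator (key, count) is extended or flushed, so there is no index arithmetic and no inner loop.
import Mathlib
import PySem

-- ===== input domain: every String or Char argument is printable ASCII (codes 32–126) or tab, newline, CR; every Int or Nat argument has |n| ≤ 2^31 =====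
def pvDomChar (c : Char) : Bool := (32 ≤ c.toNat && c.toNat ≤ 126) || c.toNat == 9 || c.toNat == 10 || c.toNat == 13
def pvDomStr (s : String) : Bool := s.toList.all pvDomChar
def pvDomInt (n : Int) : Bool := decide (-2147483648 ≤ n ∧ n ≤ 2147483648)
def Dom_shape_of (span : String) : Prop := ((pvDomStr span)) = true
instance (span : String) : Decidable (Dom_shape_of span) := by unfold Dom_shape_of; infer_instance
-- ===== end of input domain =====

-- B replaces A's index-driven outer loop with nested run-scanning while loops by a single
-- streaming fold over the characters keyed by a per-character class ('d'/'A'/'a'/literal),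
-- accumulating one current run; objective: simpler (one pass, no index arithmetic).

-- ===== PORT A =====
-- inner 'while j < len(span) and <p>(span[j])' loops of A: split off the longest prefix of p
def pvSpanWhile (p : Char → Bool) : List Char → List Char × List Char
  | [] => ([], [])
  | c :: cs =>
    if p c then
      let r := pvSpanWhile p cs
      (c :: r.1, r.2)
    else ([], c :: cs)

theorem pvSpanWhile_snd_length (p : Char → Bool) (cs : List Char) :
    (pvSpanWhile p cs).2.length ≤ cs.length := by
  induction cs with
  | nil => simp [pvSpanWhile]
  | cons c cs ih => simp only [pvSpanWhile]; split <;> simp <;> omega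

-- '"A" if ch.isupper() else "a"'
def pvClsA (c : Char) : Char := if PySem.Chars.isupper c then 'A' else 'a'

def shapeA_go : List Char → List String
  | [] => []
  | ch :: rest =>
    if PySem.Chars.isdigit ch then
      let r := pvSpanWhile PySem.Chars.isdigit rest
      ("d" ++ PySem.Int.toStr ((r.1.length : Int) + 1)) :: shapeA_go r.2
    else if PySem.Chars.isalpha ch then
      let cls := pvClsA ch
      let r := pvSpanWhile (fun c => PySem.Chars.isalpha c && (pvClsA c == cls)) rest
      (cls.toString ++ PySem.Int.toStr ((r.1.length : Int) + 1)) :: shapeA_go r.2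
    else if ch == ' ' then
      " " :: shapeA_go rest
    else
      ch.toString :: shapeA_go rest
termination_by l => l.length
decreasing_by
  · exact Nat.lt_succ_of_le (pvSpanWhile_snd_length _ _)
  · exact Nat.lt_succ_of_le (pvSpanWhile_snd_length _ _)
  · simp
  · simp

def shape_of (span : String) : String :=
  PySem.Str.join "" (shapeA_go span.toList)

-- ===== PORT B =====
def pvKey (c : Char) : Char :=
  if PySem.Chars.isdigit c then 'd'
  else if PySem.Chars.isalpha c then (if PySem.Chars.isupper c then 'A' else 'a')
  else c

def pvCounted (k : Char) : Bool := k == 'd' || k == 'A' || k == 'a'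

def pvFlush (k : Char) (count : Int) : String :=
  if pvCounted k then k.toString ++ PySem.Int.toStr count else k.toString

def pvStepB (st : Option (Char × Int) × List String) (ch : Char) :
    Option (Char × Int) × List String :=
  let k := pvKey ch
  match st with
  | (some (cur, count), pieces) =>
    if k == cur && pvCounted k then (some (cur, count + 1), pieces)
    else (some (k, 1), pieces ++ [pvFlush cur count])
  | (none, pieces) => (some (k, 1), pieces)

def pvFinish (st : Option (Char × Int) × List String) : List String :=
  match st with
  | (some (cur, count), pieces) => pieces ++ [pvFlush cur count]
  | (none, pieces) => pieces

def shape_of_alt (span : String) : String :=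
  PySem.Str.join "" (pvFinish (span.toList.foldl pvStepB (none, [])))

-- ===== PRECONDITION & SPEC =====
def Spec_shape_of (span : String) (out : String) : Prop := out = shape_of_alt span
instance (span : String) (out : String) : Decidable (Spec_shape_of span out) := by unfold Spec_shape_of; infer_instance

-- ===== CLAIM (what is proved, stated in full; the proofs are below) =====
def Claim_equal_shape_of : Prop := ∀ (span : String), Dom_shape_of span → Spec_shape_of span (shape_of span)

-- ===== LEMMAS AND PROOFS =====
theorem pvSpanWhile_append (p : Char → Bool) (cs : List Char) :
    (pvSpanWhile p cs).1 ++ (pvSpanWhile p cs).2 = cs := by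
  induction cs with
  | nil => simp [pvSpanWhile]
  | cons c cs ih => simp only [pvSpanWhile]; split <;> simp [ih]

theorem pvSpanWhile_all (p : Char → Bool) (cs : List Char) :
    ∀ c ∈ (pvSpanWhile p cs).1, p c = true := by
  induction cs with
  | nil => simp [pvSpanWhile]
  | cons c cs ih =>
    simp only [pvSpanWhile]
    split
    · intro x hx
      rcases List.mem_cons.mp hx with h | h
      · subst h; assumption
      · exact ih x h
    · simp

theorem pvSpanWhile_head (p : Char → Bool) (cs : List Char) :
    ∀ c, (pvSpanWhile p cs).2.head? = some c → p c = false := by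
  induction cs with
  | nil => simp [pvSpanWhile]
  | cons c cs ih =>
    simp only [pvSpanWhile]
    split
    · exact ih
    · intro x hx
      simp only [List.head?_cons, Option.some.injEq] at hx
      subst hx
      simpa using ‹¬ p c = true›

-- letters and digits never carry the literal keys, and the class keys are consistent
theorem pvKey_digit (c : Char) (h : PySem.Chars.isdigit c = true) : pvKey c = 'd' := by
  simp [pvKey, h]

theorem pvKey_alpha (c : Char) (hd : PySem.Chars.isdigit c = false)
    (ha : PySem.Chars.isalpha c = true) : pvKey c = pvClsA c := by
  simp [pvKey, pvClsA, hd, ha]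

theorem pvAlpha_of_counted (c : Char) (h : pvCounted c = true) :
    PySem.Chars.isalpha c = true := by
  have : c = 'd' ∨ c = 'A' ∨ c = 'a' := by
    simpa [pvCounted, or_assoc] using h
  rcases this with h | h | h <;> subst h <;> decide

theorem pvCounted_other (c : Char) (hd : PySem.Chars.isdigit c = false)
    (ha : PySem.Chars.isalpha c = false) : pvCounted c = false := by
  by_contra h
  have := pvAlpha_of_counted c (by simpa using h)
  simp [this] at ha

theorem pvCounted_cls (c : Char) : pvCounted (pvClsA c) = true := by
  unfold pvClsA; split <;> decide

theorem pvNotDigit_of_alpha (c : Char) (h : PySem.Chars.isalpha c = true) :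
    PySem.Chars.isdigit c = false := by
  simp only [PySem.Chars.isalpha, PySem.Chars.isupper, PySem.Chars.islower, Bool.or_eq_true,
    Bool.and_eq_true, decide_eq_true_eq] at h
  simp only [PySem.Chars.isdigit, Bool.and_eq_false_iff, decide_eq_false_iff_not]
  have e0 : ('0':Char).val.toNat = 48 := by decide
  have e9 : ('9':Char).val.toNat = 57 := by decide
  have eA : ('A':Char).val.toNat = 65 := by decide
  have eZ : ('Z':Char).val.toNat = 90 := by decide
  have ea : ('a':Char).val.toNat = 97 := by decide
  have ez : ('z':Char).val.toNat = 122 := by decide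
  simp only [Char.le_def, UInt32.le_iff_toNat_le, not_le, e0, e9, eA, eZ, ea, ez] at *
  omega

theorem pvKey_other (c : Char) (hd : PySem.Chars.isdigit c = false)
    (ha : PySem.Chars.isalpha c = false) : pvKey c = c := by
  simp [pvKey, hd, ha]

-- the run lemma: a block of characters all carrying the counted key k just increments the counter
theorem pvFoldl_run (run : List Char) (k : Char) (hk : pvCounted k = true) :
    ∀ (n : Int) (pieces : List String), (∀ c ∈ run, pvKey c = k) →
      run.foldl pvStepB (some (k, n), pieces) = (some (k, n + run.length), pieces) := by
  induction run with
  | nil => intro n pieces _; simp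
  | cons c cs ih =>
    intro n pieces hall
    have hc : pvKey c = k := hall c (List.mem_cons_self ..)
    have hrest : ∀ c ∈ cs, pvKey c = k := fun x hx => hall x (List.mem_cons_of_mem _ hx)
    simp only [List.foldl_cons, pvStepB, hc, hk, BEq.rfl, Bool.and_self, if_true]
    rw [ih (n + 1) pieces hrest]
    have h1 : n + 1 + (cs.length : Int) = n + ((c :: cs).length : Int) := by
      simp only [List.length_cons]; push_cast; ring
    rw [h1]

-- the handoff lemma: when the next character cannot extend the current run, flushing now
-- and restarting from the empty state gives the same final result
theorem pvFoldl_handoff (l : List Char) (k : Char) (n : Int) (pieces : List String)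
    (h : ∀ c, l.head? = some c → (pvKey c == k && pvCounted (pvKey c)) = false) :
    pvFinish (l.foldl pvStepB (some (k, n), pieces)) =
      pvFinish (l.foldl pvStepB (none, pieces ++ [pvFlush k n])) := by
  cases l with
  | nil => simp [pvFinish]
  | cons c cs =>
    have hc := h c (by simp)
    simp only [List.foldl_cons, pvStepB, hc, Bool.false_eq_true, if_false]

-- B's streaming fold, finished, equals A's run-by-run output (generalized over the emitted pieces)
theorem pvB_eq_A : ∀ (N : Nat) (cs : List Char), cs.length ≤ N → ∀ (pieces : List String),
    pvFinish (cs.foldl pvStepB (none, pieces)) = pieces ++ shapeA_go cs := by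
  intro N
  induction N with
  | zero =>
    intro cs hcs pieces
    have : cs = [] := List.eq_nil_of_length_eq_zero (Nat.le_zero.mp hcs)
    subst this
    simp [pvFinish, shapeA_go]
  | succ N ih =>
    intro cs hcs pieces
    cases cs with
    | nil => simp [pvFinish, shapeA_go]
    | cons ch rest =>
      simp only [List.length_cons, Nat.succ_le_succ_iff] at hcs
      by_cases hd : PySem.Chars.isdigit ch = true
      · -- digit run
        obtain ⟨run, rest', hsplit⟩ :
            ∃ a b, pvSpanWhile PySem.Chars.isdigit rest = (a, b) := ⟨_, _, rfl⟩
        have happ : run ++ rest' = rest := by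
          have := pvSpanWhile_append PySem.Chars.isdigit rest
          rw [hsplit] at this; simpa using this
        have hall : ∀ c ∈ run, pvKey c = 'd' := by
          intro c hcmem
          exact pvKey_digit c
            (pvSpanWhile_all PySem.Chars.isdigit rest c (by rw [hsplit]; exact hcmem))
        have hhead : ∀ c, rest'.head? = some c →
            (pvKey c == 'd' && pvCounted (pvKey c)) = false := by
          intro c hcH
          have hpc : PySem.Chars.isdigit c = false :=
            pvSpanWhile_head PySem.Chars.isdigit rest c (by rw [hsplit]; exact hcH)
          have : pvKey c ≠ 'd' := by
            by_cases hca : PySem.Chars.isalpha c = true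
            · rw [pvKey_alpha c hpc hca]
              unfold pvClsA; split <;> decide
            · rw [pvKey_other c hpc (by simpa using hca)]
              intro hcd
              subst hcd
              exact hca (by decide)
          simp [this]
        have hlen' : rest'.length ≤ N := by
          have h2 : run.length + rest'.length = rest.length := by rw [← happ]; simp
          omega
        have hA : shapeA_go (ch :: rest) =
            ("d" ++ PySem.Int.toStr ((run.length : Int) + 1)) :: shapeA_go rest' := by
          rw [shapeA_go]
          simp only [hd, if_true, hsplit]
        have hfl : pvFlush 'd' (1 + (run.length : Int)) =
            "d" ++ PySem.Int.toStr ((run.length : Int) + 1) := by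
          have h1 : (1 : Int) + run.length = (run.length : Int) + 1 := by ring
          simp only [pvFlush, pvCounted, h1]
          norm_num
          rfl
        calc pvFinish ((ch :: rest).foldl pvStepB (none, pieces))
            = pvFinish ((run ++ rest').foldl pvStepB (some ('d', 1), pieces)) := by
              rw [happ]
              simp only [List.foldl_cons, pvStepB, pvKey_digit ch hd]
          _ = pvFinish (rest'.foldl pvStepB (some ('d', 1 + (run.length : Int)), pieces)) := by
              rw [List.foldl_append, pvFoldl_run run 'd' (by decide) 1 pieces hall]
          _ = pvFinish (rest'.foldl pvStepB
                (none, pieces ++ [pvFlush 'd' (1 + (run.length : Int))])) :=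
              pvFoldl_handoff rest' 'd' _ pieces hhead
          _ = pieces ++ [pvFlush 'd' (1 + (run.length : Int))] ++ shapeA_go rest' :=
              ih rest' hlen' _
          _ = pieces ++ shapeA_go (ch :: rest) := by
              rw [hA, hfl]
              simp
      · by_cases ha : PySem.Chars.isalpha ch = true
        · -- alpha run of one case-class
          have hd' : PySem.Chars.isdigit ch = false := by simpa using hd
          obtain ⟨run, rest', hsplit⟩ :
              ∃ a b, pvSpanWhile
                (fun c => PySem.Chars.isalpha c && (pvClsA c == pvClsA ch)) rest = (a, b) :=
            ⟨_, _, rfl⟩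
          have happ : run ++ rest' = rest := by
            have := pvSpanWhile_append
              (fun c => PySem.Chars.isalpha c && (pvClsA c == pvClsA ch)) rest
            rw [hsplit] at this; simpa using this
          have hall : ∀ c ∈ run, pvKey c = pvClsA ch := by
            intro c hcmem
            have hpc := pvSpanWhile_all
              (fun c => PySem.Chars.isalpha c && (pvClsA c == pvClsA ch)) rest c
              (by rw [hsplit]; exact hcmem)
            simp only [Bool.and_eq_true, beq_iff_eq] at hpc
            rw [pvKey_alpha c (pvNotDigit_of_alpha c hpc.1) hpc.1]
            exact hpc.2
          have hcnt : pvCounted (pvClsA ch) = true := pvCounted_cls ch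
          have hhead : ∀ c, rest'.head? = some c →
              (pvKey c == pvClsA ch && pvCounted (pvKey c)) = false := by
            intro c hcH
            have hpc := pvSpanWhile_head
              (fun c => PySem.Chars.isalpha c && (pvClsA c == pvClsA ch)) rest c
              (by rw [hsplit]; exact hcH)
            simp only [Bool.and_eq_false_iff, beq_eq_false_iff_ne] at hpc
            have : pvKey c ≠ pvClsA ch := by
              by_cases hcd : PySem.Chars.isdigit c = true
              · rw [pvKey_digit c hcd]
                unfold pvClsA; split <;> decide
              · simp only [Bool.not_eq_true] at hcd
                by_cases hca : PySem.Chars.isalpha c = true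
                · rw [pvKey_alpha c hcd hca]
                  rcases hpc with h | h
                  · simp [hca] at h
                  · exact h
                · rw [pvKey_other c hcd (by simpa using hca)]
                  intro hcc
                  apply hca
                  rw [hcc]
                  unfold pvClsA; split <;> decide
            simp [this]
          have hlen' : rest'.length ≤ N := by
            have h2 : run.length + rest'.length = rest.length := by rw [← happ]; simp
            omega
          have hkch : pvKey ch = pvClsA ch := pvKey_alpha ch hd' ha
          have hA : shapeA_go (ch :: rest) =
              ((pvClsA ch).toString ++ PySem.Int.toStr ((run.length : Int) + 1)) ::
                shapeA_go rest' := by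
            rw [shapeA_go]
            simp only [hd', Bool.false_eq_true, if_false, ha, if_true, hsplit]
          have hfl : pvFlush (pvClsA ch) (1 + (run.length : Int)) =
              (pvClsA ch).toString ++ PySem.Int.toStr ((run.length : Int) + 1) := by
            have h1 : (1 : Int) + run.length = (run.length : Int) + 1 := by ring
            simp only [pvFlush, hcnt, h1, if_true]
          calc pvFinish ((ch :: rest).foldl pvStepB (none, pieces))
              = pvFinish ((run ++ rest').foldl pvStepB (some (pvClsA ch, 1), pieces)) := by
                rw [happ]
                simp only [List.foldl_cons, pvStepB, hkch]
            _ = pvFinish (rest'.foldl pvStepB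
                  (some (pvClsA ch, 1 + (run.length : Int)), pieces)) := by
                rw [List.foldl_append, pvFoldl_run run (pvClsA ch) hcnt 1 pieces hall]
            _ = pvFinish (rest'.foldl pvStepB
                  (none, pieces ++ [pvFlush (pvClsA ch) (1 + (run.length : Int))])) :=
                pvFoldl_handoff rest' (pvClsA ch) _ pieces hhead
            _ = pieces ++ [pvFlush (pvClsA ch) (1 + (run.length : Int))] ++ shapeA_go rest' :=
                ih rest' hlen' _
            _ = pieces ++ shapeA_go (ch :: rest) := by
                rw [hA, hfl]
                simp
        · -- single non-alphanumeric character emitted literally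
          have hd' : PySem.Chars.isdigit ch = false := by simpa using hd
          have ha' : PySem.Chars.isalpha ch = false := by simpa using ha
          have hk : pvKey ch = ch := pvKey_other ch hd' ha'
          have hcnt : pvCounted ch = false := pvCounted_other ch hd' ha'
          have hhead : ∀ c, rest.head? = some c →
              (pvKey c == ch && pvCounted (pvKey c)) = false := by
            intro c _
            by_cases hkc : pvKey c = ch
            · simp [hkc, hcnt]
            · simp [hkc]
          have step1 : (ch :: rest).foldl pvStepB (none, pieces) =
              rest.foldl pvStepB (some (ch, 1), pieces) := by
            simp only [List.foldl_cons, pvStepB, hk]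
          have hfl : pvFlush ch 1 = ch.toString := by
            simp [pvFlush, hcnt]
          have hA : shapeA_go (ch :: rest) = ch.toString :: shapeA_go rest := by
            rw [shapeA_go]
            simp only [hd', Bool.false_eq_true, if_false, ha']
            by_cases hsp : ch = ' '
            · subst hsp
              norm_num
              rfl
            · simp [hsp]
          rw [step1, pvFoldl_handoff rest ch 1 pieces hhead, hfl,
            ih rest hcs (pieces ++ [ch.toString]), hA]
          simp

-- ===== VERDICT (by name: the statement is the Claim_ definition above) =====
theorem shape_of_spec : Claim_equal_shape_of := by
  intro span _
  unfold Spec_shape_of shape_of shape_of_alt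
  rw [pvB_eq_A span.toList.length span.toList (le_refl _) []]
  simp
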